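-- pv_equiv track=rewrite | github.com/jacoterh/cluster | nnpdf/matrix/handle_cluster.py | modify_request_by_grepping_job_ids
-- ===== SOURCE A (Python) =====
-- def modify_request_by_grepping_job_ids(request,job_ids):
-- # function greps for job ids in request and returns all lines containing one of the job_ids
--     request_tmp = ""
--     for line in request.splitlines():
--         for id in job_ids:
--             if id in line:
--                 request_tmp += line+'\n'
--     request = request_tmp
--     return request
-- ===== SOURCE B (Python) =====
-- def modify_request_by_grepping_job_ids(request, job_ids):
--     # pattern-major grep: collect one (line_number, line) hit per id occurrence,
--     # then a stable sort by line number restores document order before joining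
--     lines = request.splitlines()
--     hits = []
--     for jid in job_ids:
--         for i, line in enumerate(lines):
--             if jid in line:
--                 hits.append((i, line))
--     hits.sort(key=lambda hit: hit[0])
--     return "".join(line + "\n" for _, line in hits)
-- ===== Notes on version B (the rewrite author's own statement) =====
-- stated objective: alternative
-- what changed: Instead of A's line-major nested loops growing a string with +=, B scans pattern-major, collecting one (line_number, line) hit record per id occurrence, then stable-sorts the hit list by line number and joins -- a grep-per-pattern-then-merge strategy.
import Mathlib
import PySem

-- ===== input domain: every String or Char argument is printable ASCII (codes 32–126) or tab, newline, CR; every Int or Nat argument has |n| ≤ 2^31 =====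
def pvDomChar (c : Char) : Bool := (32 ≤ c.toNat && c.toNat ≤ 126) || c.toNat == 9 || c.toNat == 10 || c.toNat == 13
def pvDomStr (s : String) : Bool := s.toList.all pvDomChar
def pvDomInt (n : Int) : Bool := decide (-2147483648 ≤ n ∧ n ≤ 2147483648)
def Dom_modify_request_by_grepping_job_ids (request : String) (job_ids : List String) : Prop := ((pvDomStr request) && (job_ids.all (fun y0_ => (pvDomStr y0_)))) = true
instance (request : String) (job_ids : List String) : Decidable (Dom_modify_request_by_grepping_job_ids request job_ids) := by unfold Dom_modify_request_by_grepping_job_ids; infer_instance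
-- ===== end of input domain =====

-- B replaces A's line-major nested +=-loops by a pattern-major scan that collects
-- (line_number, line) hit records, stable-sorts them by line number and joins them
-- (objective: alternative, same exact return value).

-- ===== PORT A =====
def modify_request_by_grepping_job_ids (request : String) (job_ids : List String) : String :=
  (PySem.Str.splitlines request).foldl
    (fun request_tmp line =>
      job_ids.foldl
        (fun request_tmp id =>
          if PySem.Str.isIn id line then request_tmp ++ (line ++ "\n") else request_tmp)
        request_tmp)
    ""

-- ===== PORT B =====
def modify_request_by_grepping_job_ids_alt (request : String) (job_ids : List String) : String :=
  PySem.Str.join ""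
    ((PySem.List.sorted
        (job_ids.foldl
          (fun hits jid =>
            (PySem.List.enumerate (PySem.Str.splitlines request)).foldl
              (fun hits p => if PySem.Str.isIn jid p.2 then hits ++ [p] else hits)
              hits)
          [])
        (fun hit => hit.1) false).map
      (fun p => p.2 ++ "\n"))

-- ===== PRECONDITION & SPEC =====
def Spec_modify_request_by_grepping_job_ids (request : String) (job_ids : List String) (out : String) : Prop := out = modify_request_by_grepping_job_ids_alt request job_ids
instance (request : String) (job_ids : List String) (out : String) : Decidable (Spec_modify_request_by_grepping_job_ids request job_ids out) := by unfold Spec_modify_request_by_grepping_job_ids; infer_instance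

-- ===== CLAIM (what is proved, stated in full; the proofs are below) =====
def Claim_equal_modify_request_by_grepping_job_ids : Prop := ∀ (request : String) (job_ids : List String), Dom_modify_request_by_grepping_job_ids request job_ids → Spec_modify_request_by_grepping_job_ids request job_ids (modify_request_by_grepping_job_ids request job_ids)

-- ===== LEMMAS AND PROOFS =====

-- number of job ids occurring in a line
def pvK (ids : List String) (l : String) : Nat := ids.countP (fun jid => PySem.Str.isIn jid l)

-- repetition of a string (definitionally a join of replicates)
def pvRep (s : String) (n : Nat) : String := PySem.Str.join "" (List.replicate n s)

-- the canonical (line-major) hit list: each enumerated line repeated once per matching id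
def pvCanon (ids : List String) (ps : List (Int × String)) : List (Int × String) :=
  ps.flatMap (fun p => List.replicate (pvK ids p.2) p)

theorem pvJoin_empty_nil : PySem.Str.join "" ([] : List String) = "" := by
  apply String.toList_inj.mp
  simp [PySem.Chars.join, List.intercalate]

theorem pvJoin_empty_cons (x : String) (xs : List String) :
    PySem.Str.join "" (x :: xs) = x ++ PySem.Str.join "" xs := by
  apply String.toList_inj.mp
  simp
  cases xs <;> simp [PySem.Chars.join, List.intercalate]

theorem pv_empty_append (s : String) : "" ++ s = s := by
  apply String.toList_inj.mp
  simp

theorem pvJoin_append (xs ys : List String) :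
    PySem.Str.join "" (xs ++ ys) = PySem.Str.join "" xs ++ PySem.Str.join "" ys := by
  induction xs with
  | nil => rw [List.nil_append, pvJoin_empty_nil, pv_empty_append]
  | cons x r ih => rw [List.cons_append, pvJoin_empty_cons, pvJoin_empty_cons, ih,
      String.append_assoc]

theorem pvRep_succ (s : String) (n : Nat) : pvRep s (n + 1) = s ++ pvRep s n := by
  simp [pvRep, List.replicate_succ, pvJoin_empty_cons]

-- A's inner loop appends one copy of (line+"\n") per matching id
theorem pv_inner (line : String) (ids : List String) : ∀ (acc : String),
    ids.foldl
      (fun acc id => if PySem.Str.isIn id line then acc ++ (line ++ "\n") else acc) acc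
    = acc ++ pvRep (line ++ "\n") (pvK ids line) := by
  induction ids with
  | nil => intro acc; simp [pvRep, pvK, pvJoin_empty_nil]
  | cons id rest ih =>
    intro acc
    rw [List.foldl_cons]
    simp only [pvK, List.countP_cons] at *
    by_cases h : PySem.Str.isIn id line = true
    · rw [if_pos h, ih, if_pos h, pvRep_succ, String.append_assoc]
    · rw [if_neg h, ih, if_neg h, Nat.add_zero]

-- characterisation of A as a join of per-line repetitions
theorem pv_outer (job_ids : List String) (lines : List String) : ∀ (acc : String),
    lines.foldl
      (fun acc line =>
        job_ids.foldl
          (fun acc id => if PySem.Str.isIn id line then acc ++ (line ++ "\n") else acc) acc)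
      acc
    = acc ++ PySem.Str.join ""
        (lines.map (fun line => pvRep (line ++ "\n") (pvK job_ids line))) := by
  induction lines with
  | nil => intro acc; simp [pvJoin_empty_nil]
  | cons l rest ih =>
    intro acc
    rw [List.foldl_cons, pv_inner, ih, List.map_cons, pvJoin_empty_cons, String.append_assoc]

-- joining the canonical hit list is the per-line repetition join
theorem pv_canon_join (ids : List String) (ps : List (Int × String)) :
    PySem.Str.join "" ((pvCanon ids ps).map (fun p => p.2 ++ "\n"))
    = PySem.Str.join "" (ps.map (fun p => pvRep (p.2 ++ "\n") (pvK ids p.2))) := by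
  induction ps with
  | nil => simp [pvCanon]
  | cons p rest ih =>
    rw [pvCanon, List.flatMap_cons, List.map_append, pvJoin_append, List.map_cons,
      pvJoin_empty_cons, List.map_replicate]
    rw [show PySem.Str.join "" (List.replicate (pvK ids p.2) (p.2 ++ "\n"))
        = pvRep (p.2 ++ "\n") (pvK ids p.2) from rfl]
    rw [show (rest.flatMap fun p => List.replicate (pvK ids p.2) p) = pvCanon ids rest from rfl,
      ih]

-- interchange: a flatMap of appends is a permutation of the appended flatMaps
theorem pv_perm_flatMap_append {α β : Type} (xs : List α) (f g : α → List β) :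
    (xs.flatMap (fun x => f x ++ g x)).Perm (xs.flatMap f ++ xs.flatMap g) := by
  induction xs with
  | nil => simp
  | cons x r ih =>
    simp only [List.flatMap_cons, List.append_assoc]
    apply List.Perm.append_left
    have h1 : (g x ++ r.flatMap (fun y => f y ++ g y)).Perm
        (g x ++ (r.flatMap f ++ r.flatMap g)) := ih.append_left _
    have h2 : (g x ++ (r.flatMap f ++ r.flatMap g)).Perm
        ((r.flatMap f ++ r.flatMap g) ++ g x) := List.perm_append_comm
    have h3 : ((r.flatMap f ++ r.flatMap g) ++ g x).Perm
        (r.flatMap f ++ (g x ++ r.flatMap g)) := by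
      rw [List.append_assoc]
      exact List.Perm.append_left _ List.perm_append_comm
    exact (h1.trans h2).trans h3

theorem pv_flatMap_if_singleton {α : Type} (xs : List α) (p : α → Bool) :
    (xs.flatMap (fun x => if p x then [x] else [])) = xs.filter p := by
  induction xs with
  | nil => simp
  | cons x r ih =>
    rw [List.flatMap_cons, List.filter_cons, ih]
    by_cases h : p x = true
    · rw [if_pos h, if_pos h, List.singleton_append]
    · rw [if_neg h, if_neg h, List.nil_append]

-- one copy of x per true test is a replicate-split of the count
theorem pv_pairwise_replicate {α : Type} {r : α → α → Prop} {x : α} (h : r x x) (n : Nat) :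
    (List.replicate n x).Pairwise r := by
  induction n with
  | zero => simp
  | succ k ih =>
    rw [List.replicate_succ]
    apply List.pairwise_cons.mpr
    refine ⟨?_, ih⟩
    intro y hy
    rw [List.eq_of_mem_replicate hy]
    exact h

-- the canonical list is a permutation of the pattern-major hit list
theorem pv_canon_perm (ids : List String) (ps : List (Int × String)) :
    (pvCanon ids ps).Perm
      (ids.flatMap (fun jid => ps.filter (fun p => PySem.Str.isIn jid p.2))) := by
  induction ids with
  | nil => simp [pvCanon, pvK]
  | cons jid rest ih =>
    rw [List.flatMap_cons]
    have hsplit : pvCanon (jid :: rest) ps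
        = ps.flatMap (fun p =>
            List.replicate (pvK rest p.2) p
              ++ (if PySem.Str.isIn jid p.2 then [p] else [])) := by
      unfold pvCanon
      congr 1
      funext p
      rw [pvK, List.countP_cons, List.replicate_add]
      congr 1
      by_cases h : PySem.Str.isIn jid p.2 = true
      · rw [if_pos h, if_pos h]
        rfl
      · rw [if_neg h, if_neg h]
        rfl
    rw [hsplit]
    have hA : (ps.flatMap (fun p => List.replicate (pvK rest p.2) p
          ++ (if PySem.Str.isIn jid p.2 then [p] else []))).Perm
        (pvCanon rest ps ++ ps.filter (fun p => PySem.Str.isIn jid p.2)) := by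
      have h0 := pv_perm_flatMap_append ps
        (fun p => List.replicate (pvK rest p.2) p)
        (fun p => if PySem.Str.isIn jid p.2 then [p] else [])
      rw [pv_flatMap_if_singleton] at h0
      exact h0
    have hB : (pvCanon rest ps ++ ps.filter (fun p => PySem.Str.isIn jid p.2)).Perm
        (ps.filter (fun p => PySem.Str.isIn jid p.2) ++ pvCanon rest ps) :=
      List.perm_append_comm
    have hC := List.Perm.append_left (ps.filter (fun p => PySem.Str.isIn jid p.2)) ih
    exact (hA.trans hB).trans hC

-- key lower bound for members of the canonical list
theorem pv_canon_fst_mem (ids : List String) (ps : List (Int × String)) (q : Int × String)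
    (hq : q ∈ pvCanon ids ps) : q ∈ ps := by
  unfold pvCanon at hq
  obtain ⟨p, hp, hq2⟩ := List.mem_flatMap.mp hq
  rw [List.eq_of_mem_replicate hq2]
  exact hp

-- the canonical list is sorted (weakly) by line number
theorem pv_canon_pairwise (ids : List String) (ps : List (Int × String))
    (hps : ps.Pairwise (fun a b => a.1 < b.1)) :
    (pvCanon ids ps).Pairwise (fun a b => a.1 ≤ b.1) := by
  induction ps with
  | nil => simp [pvCanon]
  | cons p rest ih =>
    rw [pvCanon, List.flatMap_cons]
    have hcons := List.pairwise_cons.mp hps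
    apply List.pairwise_append.mpr
    refine ⟨?_, ?_, ?_⟩
    · apply pv_pairwise_replicate
      exact le_refl _
    · exact ih hcons.2
    · intro a ha b hb
      rw [List.eq_of_mem_replicate ha]
      have hb' := pv_canon_fst_mem ids rest b hb
      exact le_of_lt (hcons.1 b hb')

-- within an enumeration the line number determines the record
theorem pv_enum_inj (xs : List String) (a b : Int × String)
    (ha : a ∈ PySem.List.enumerate xs) (hb : b ∈ PySem.List.enumerate xs)
    (hfst : a.1 = b.1) : a = b := by
  obtain ⟨k, hk, rfl⟩ := (PySem.List.mem_enumerate_iff _ _ _).mp ha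
  obtain ⟨k', hk', rfl⟩ := (PySem.List.mem_enumerate_iff _ _ _).mp hb
  simp at hfst
  have : k = k' := by omega
  subst this
  rfl

-- uniqueness of a weakly key-sorted arrangement when equal keys force equal elements
theorem pv_sorted_unique {α κ : Type} [LinearOrder κ] (key : α → κ) :
    ∀ (l₁ l₂ : List α), l₁.Perm l₂ →
      l₁.Pairwise (fun a b => key a ≤ key b) → l₂.Pairwise (fun a b => key a ≤ key b) →
      (∀ a ∈ l₁, ∀ b ∈ l₁, key a = key b → a = b) → l₁ = l₂ := by
  intro l₁
  induction l₁ with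
  | nil => intro l₂ h _ _ _; exact h.nil_eq
  | cons a t₁ ih =>
    intro l₂ h h₁ h₂ hinj
    cases l₂ with
    | nil => exact absurd h.eq_nil (by simp)
    | cons b t₂ =>
      have hc₁ := List.pairwise_cons.mp h₁
      have hc₂ := List.pairwise_cons.mp h₂
      have hab : a = b := by
        have ha2 : a ∈ b :: t₂ := h.subset (List.mem_cons_self ..)
        rcases List.mem_cons.mp ha2 with hh | hh
        · exact hh
        · have hba : key b ≤ key a := hc₂.1 a hh
          have hb1 : b ∈ a :: t₁ := h.symm.subset (List.mem_cons_self ..)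
          rcases List.mem_cons.mp hb1 with hh2 | hh2
          · exact hh2.symm
          · have hab' : key a ≤ key b := hc₁.1 b hh2
            exact hinj a (List.mem_cons_self ..) b (List.mem_cons.mpr (Or.inr hh2))
              (le_antisymm hab' hba)
      subst hab
      have ht : t₁.Perm t₂ := h.cons_inv
      have : t₁ = t₂ := by
        apply ih t₂ ht hc₁.2 hc₂.2
        intro x hx y hy
        exact hinj x (List.mem_cons.mpr (Or.inr hx)) y (List.mem_cons.mpr (Or.inr hy))
      rw [this]

-- ===== VERDICT (by name: the statement is the Claim_ definition above) =====
theorem modify_request_by_grepping_job_ids_spec : Claim_equal_modify_request_by_grepping_job_ids := by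
  intro request job_ids _
  show modify_request_by_grepping_job_ids request job_ids = _
  unfold modify_request_by_grepping_job_ids modify_request_by_grepping_job_ids_alt
  rw [pv_outer, pv_empty_append]
  have hinner : (fun (hits : List (Int × String)) (jid : String) =>
      (PySem.List.enumerate (PySem.Str.splitlines request)).foldl
        (fun hits p => if PySem.Str.isIn jid p.2 then hits ++ [p] else hits) hits)
      = fun hits jid => hits
          ++ (PySem.List.enumerate (PySem.Str.splitlines request)).filter
              (fun p => PySem.Str.isIn jid p.2) := by
    funext hits jid
    exact PySem.List.foldl_append_if_eq_filter _ _ _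
  rw [hinner, PySem.List.foldl_append_eq_flatMap, List.nil_append]
  have hperm := pv_canon_perm job_ids (PySem.List.enumerate (PySem.Str.splitlines request))
  have hsorted_eq : PySem.List.sorted
      (job_ids.flatMap (fun jid =>
        (PySem.List.enumerate (PySem.Str.splitlines request)).filter
          (fun p => PySem.Str.isIn jid p.2)))
      (fun hit => hit.1) false
      = pvCanon job_ids (PySem.List.enumerate (PySem.Str.splitlines request)) := by
    apply pv_sorted_unique (fun hit : Int × String => hit.1)
    · exact (PySem.List.sorted_perm ..).trans hperm.symm
    · exact PySem.List.sorted_pairwise ..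
    · exact pv_canon_pairwise _ _ (PySem.List.pairwise_lt_enumerate ..)
    · intro a ha b hb hfst
      have hmem : ∀ c : Int × String, c ∈ PySem.List.sorted
          (job_ids.flatMap (fun jid =>
            (PySem.List.enumerate (PySem.Str.splitlines request)).filter
              (fun p => PySem.Str.isIn jid p.2)))
          (fun hit => hit.1) false →
          c ∈ PySem.List.enumerate (PySem.Str.splitlines request) := by
        intro c hc
        have hc2 := (PySem.List.mem_sorted ..).mp hc
        obtain ⟨jid, _, hc3⟩ := List.mem_flatMap.mp hc2
        exact (List.mem_filter.mp hc3).1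
      exact pv_enum_inj _ a b (hmem a ha) (hmem b hb) hfst
  rw [hsorted_eq, pv_canon_join]
  have hmapsnd : (PySem.List.enumerate (PySem.Str.splitlines request)).map
        (fun p => pvRep (p.2 ++ "\n") (pvK job_ids p.2))
      = (PySem.Str.splitlines request).map
        (fun line => pvRep (line ++ "\n") (pvK job_ids line)) := by
    have hm : (PySem.List.enumerate (PySem.Str.splitlines request)).map (·.2)
        = PySem.Str.splitlines request := PySem.List.map_snd_enumerate ..
    rw [show (fun p : Int × String => pvRep (p.2 ++ "\n") (pvK job_ids p.2))
        = (fun line => pvRep (line ++ "\n") (pvK job_ids line)) ∘ (·.2) from rfl,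
      ← List.map_map, hm]
  rw [hmapsnd]
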